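-- pv_equiv track=rewrite | github.com/dalehagglund/everybody-codes-2025 | ec07/ec07.py | part3_dynprog
-- ===== SOURCE A (Python) =====
-- from functools import partial, reduce
-- import functools
-- from itertools import pairwise, count, groupby
--
-- def is_valid(follows, name):
--     return all(
--         ch2 in follows[ch1]
--         for ch1, ch2
--         in pairwise(name)
--     )
--
-- def part3_dynprog(input):
--     prefixes, follows = input
--
--     minlen, maxlen = 7, 11
--
--     trace = print
--     trace = lambda *a, **kw: None
--
--
--     def find_roots(prefixes):
--         roots = set()
--         for candidate in prefixes:
--             if any(candidate.startswith(r) for r in roots):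
--                 continue
--             roots.add(candidate)
--         return roots
--
--     @functools.cache
--     def extensions(last, length, depth=2):
--         recur = partial(extensions, depth=depth+1)
--         prefix = ".. " * depth
--         trace(f"{prefix}> ({last}, {length})")
--
--         total = 0
--         if length == maxlen:
--             trace(f"{prefix}  reached max length")
--             total = 1
--         else:
--             if minlen <= length < maxlen:
--                 total += 1
--             successors = follows.get(last, {})
--             trace(f"{prefix}  successors = {''.join(successors)!r}")
--             for ch in successors:
--                 total += recur(ch, length + 1)
--
--         trace(f"{prefix}< ({last}, {length}) = {total}")
--         return total
--
--     total = 0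
--     for root in find_roots(prefixes):
--         if not is_valid(follows, root):
--             continue
--         total += extensions(root[-1], len(root))
--     return total
-- ===== SOURCE B (Python) =====
-- def part3_dynprog(input):
--     prefixes, follows = input
--
--     minlen, maxlen = 7, 11
--
--     roots = set()
--     for candidate in prefixes:
--         if not any(candidate.startswith(r) for r in roots):
--             roots.add(candidate)
--
--     def chain_ok(name):
--         return all(b in follows[a] for a, b in zip(name, name[1:]))
--
--     # bottom-up table, built from length maxlen down to 0: tables[L] maps a
--     # last-character to its number of extensions at length L; characters absent
--     # from the table (no successors) default to 1 when minlen <= L, else 0.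
--     tables = [{}]                       # level maxlen: every character counts 1 (the default)
--     for L in range(maxlen - 1, -1, -1):
--         nxt = tables[0]
--         nxt_default = 1 if minlen <= L + 1 else 0
--         here = 1 if minlen <= L else 0
--         tables.insert(0, {
--             ch: here + sum(nxt.get(s, nxt_default) for s in succs)
--             for ch, succs in follows.items()
--         })
--
--     def count_at(ch, L):
--         if L > maxlen:
--             return 0
--         return tables[L].get(ch, 1 if minlen <= L else 0)
--
--     return sum(count_at(r[-1], len(r)) for r in roots if chain_ok(r))
-- ===== Notes on version B (the rewrite author's own statement) =====
-- stated objective: alternative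
-- what changed: A's memoized top-down recursive `extensions` is replaced by a bottom-up dynamic-programming table built once from length 11 down to 0 (one dict per length, keyed by last character), validity is checked with a single zip/all pass over adjacent pairs, and the tracing-only depth machinery is dropped.
-- outside the precondition, e.g. on part3_dynprog((['aaaaaaaaaaaa'], {'a': ['b']})): A returns 0, B returns 0; on part3_dynprog((['a', 'azzzzzzzzzzzz'], {'a': ['a']})): A returns 5, B returns 5
import Mathlib
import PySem

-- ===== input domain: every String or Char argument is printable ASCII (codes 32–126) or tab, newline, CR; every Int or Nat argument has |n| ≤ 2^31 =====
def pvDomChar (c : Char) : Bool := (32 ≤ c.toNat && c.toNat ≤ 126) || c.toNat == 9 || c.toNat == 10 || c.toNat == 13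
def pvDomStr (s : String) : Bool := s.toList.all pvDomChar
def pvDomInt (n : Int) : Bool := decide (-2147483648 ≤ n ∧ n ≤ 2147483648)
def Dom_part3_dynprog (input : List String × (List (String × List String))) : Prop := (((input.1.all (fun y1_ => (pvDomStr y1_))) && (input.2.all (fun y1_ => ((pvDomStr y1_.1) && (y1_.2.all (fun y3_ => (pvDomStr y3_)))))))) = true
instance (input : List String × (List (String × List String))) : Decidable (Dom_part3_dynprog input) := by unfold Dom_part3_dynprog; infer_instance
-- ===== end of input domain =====

-- B replaces A's memoized top-down recursion `extensions` with a bottom-up table of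
-- per-length extension counts (objective: alternative decomposition, same cost).

-- Shared dict primitive: first-match lookup in an association list (the Python `follows` dict).
def alGet? {ν : Type} (l : List (String × ν)) (k : String) : Option ν :=
  match l with
  | [] => none
  | p :: rest => if p.1 == k then some p.2 else alGet? rest k

def alGetD {ν : Type} (l : List (String × ν)) (k : String) (d : ν) : ν :=
  (alGet? l k).getD d

-- ===== PORT A =====

-- find_roots: fold over `prefixes` keeping a set of roots none of which is a prefix of a later kept one
def findRootsA (prefixes : List String) : PySem.Set String :=
  prefixes.foldl
    (fun roots candidate =>
      if roots.any (fun r => PySem.Str.startswith candidate r) then roots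
      else PySem.Set.add roots candidate)
    PySem.Set.empty

-- is_valid: all(ch2 in follows[ch1] for ch1, ch2 in pairwise(name)); `none` = KeyError on follows[ch1]
def isValidA? (follows : List (String × List String)) : List Char → Option Bool
  | c1 :: c2 :: rest =>
    match alGet? follows (String.singleton c1) with
    | none => none
    | some succs =>
      if succs.contains (String.singleton c2) then isValidA? follows (c2 :: rest)
      else some false
  | _ => some true

-- extensions(last, length): recursion on fuel = (11 - length).toNat, which is exactly the
-- recursion depth Python uses when length ≤ 11 (Pre_ guarantees that; fuel 0 is unreachable there)
def extA (follows : List (String × List String)) : Nat → String → Int → Int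
  | fuel, last, length =>
    if length = 11 then 1
    else
      match fuel with
      | 0 => if 7 ≤ length ∧ length < 11 then 1 else 0
      | f + 1 =>
        (alGetD follows last []).foldl
          (fun total ch => total + extA follows f ch (length + 1))
          (if 7 ≤ length ∧ length < 11 then 1 else 0)

def part3_dynprog (input : List String × (List (String × List String))) : Int :=
  let prefixes := input.1
  let follows := input.2
  (findRootsA prefixes).foldl
    (fun total root =>
      match isValidA? follows root.toList with
      | some true =>
        match root.toList.getLast? with  -- root[-1]; none = IndexError on "", outside Pre_
        | some c =>
          total + extA follows ((11 - (root.toList.length : Int)).toNat)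
                    (String.singleton c) (root.toList.length : Int)
        | none => total
      | _ => total)  -- some false: invalid, skipped; none: KeyError, outside Pre_
    0

-- ===== PORT B =====

-- the same root-keeping scan, written as a recursive function
def findRootsB (roots : PySem.Set String) : List String → PySem.Set String
  | [] => roots
  | candidate :: rest =>
    findRootsB
      (if !(roots.any (fun r => PySem.Str.startswith candidate r)) then PySem.Set.add roots candidate
       else roots)
      rest

-- chain_ok: all(b in follows[a] for a, b in zip(name, name[1:])); name[1:] = tail.
-- A missing key is a KeyError in Python (outside Pre_ on every pair all() evaluates);
-- `false` is value-faithful wherever the Python returns, since all() stops at a false pair.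
def chainOkB (follows : List (String × List String)) (name : List Char) : Bool :=
  (name.zip name.tail).all
    (fun p =>
      match alGet? follows (String.singleton p.1) with
      | none => false
      | some succs => succs.contains (String.singleton p.2))

-- one level of the table, built from the next-longer level `nxt` (the dict comprehension in Source B)
def mkLevelB (follows : List (String × List String)) (nxt : List (String × Int)) (L : Int) :
    List (String × Int) :=
  follows.map (fun p =>
    (p.1, (if 7 ≤ L then 1 else 0)
          + (p.2.map (fun s => alGetD nxt s (if 7 ≤ L + 1 then 1 else 0))).sum))

-- the `for L in range(maxlen-1, -1, -1)` loop prepending levels; levelsB follows 11 = tables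
def levelsB (follows : List (String × List String)) : Nat → List (List (String × Int))
  | 0 => [[]]
  | k + 1 =>
    mkLevelB follows ((levelsB follows k).headD []) (11 - ((k : Int) + 1)) :: levelsB follows k

def countAtB (tabs : List (List (String × Int))) (ch : String) (L : Int) : Int :=
  if 11 < L then 0
  else
    match PySem.List.pyGet? tabs L with
    | some t => alGetD t ch (if 7 ≤ L then 1 else 0)
    | none => 0

def part3_dynprog_alt (input : List String × (List (String × List String))) : Int :=
  let prefixes := input.1
  let follows := input.2
  let roots := findRootsB PySem.Set.empty prefixes
  let tabs := levelsB follows 11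
  (roots.map (fun r =>
    match r.toList.getLast? with
    | some c =>
      if chainOkB follows r.toList then countAtB tabs (String.singleton c) (r.toList.length : Int)
      else 0
    | none => 0)).sum

-- ===== PRECONDITION & SPEC =====

-- Pre_ excludes inputs where A raises or may raise: an empty prefix ("" is always kept as a root
-- and then root[-1] is an IndexError), a prefix whose left-to-right pairwise scan reaches a
-- character missing from the keys of `follows` before a failed membership test stops it
-- (KeyError in is_valid), and prefixes longer than 11 (a kept valid root longer than maxlen
-- sends A's `extensions` into unbounded recursion, RecursionError on cyclic follows).
-- This over-approximates the crash set — it also excludes some inputs on which A returns (a long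
-- prefix that is invalid or shadowed by an earlier root); B returns A's same value on those
-- (see claim.json cites).

-- the pair (a, b) has an entry for a in follows whose value contains b
def pvPairOk (follows : List (String × List String)) (p : Char × Char) : Bool :=
  follows.any (fun kv => kv.1 == String.singleton p.1 && kv.2.contains (String.singleton p.2))

-- the first component of the pair is a key of follows
def pvKeyOk (follows : List (String × List String)) (p : Char × Char) : Bool :=
  (follows.map Prod.fst).contains (String.singleton p.1)

def Pre_part3_dynprog (input : List String × (List (String × List String))) : Prop :=
  ∀ p ∈ input.1,
    p ≠ "" ∧ p.toList.length ≤ 11 ∧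
    ∀ i, (hi : i < (p.toList.zip p.toList.tail).length) →
      (∀ q ∈ (p.toList.zip p.toList.tail).take i, pvPairOk input.2 q = true) →
      pvKeyOk input.2 ((p.toList.zip p.toList.tail)[i]) = true

instance (input : List String × (List (String × List String))) : Decidable (Pre_part3_dynprog input) := by
  unfold Pre_part3_dynprog; infer_instance

def pvWitness_part3_dynprog : (List String × (List (String × List String))) :=
  (["aaaaaaa"], [("a", ["a"])])

def Spec_part3_dynprog (input : List String × (List (String × List String))) (out : Int) : Prop := out = part3_dynprog_alt input
instance (input : List String × (List (String × List String))) (out : Int) : Decidable (Spec_part3_dynprog input out) := by unfold Spec_part3_dynprog; infer_instance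

-- ===== CLAIM (what is proved, stated in full; the proofs are below) =====
def Claim_equal_part3_dynprog : Prop := ∀ (input : List String × (List (String × List String))), Dom_part3_dynprog input → Pre_part3_dynprog input → Spec_part3_dynprog input (part3_dynprog input)

-- ===== LEMMAS AND PROOFS =====

-- proof-only: the left-to-right scan A's is_valid performs never hits a missing key
def scanOk (follows : List (String × List String)) : List Char → Bool
  | c1 :: c2 :: rest =>
    match alGet? follows (String.singleton c1) with
    | none => false
    | some succs =>
      if succs.contains (String.singleton c2) then scanOk follows (c2 :: rest) else true
  | _ => true

theorem alGet?_eq_none_iff {ν : Type} (l : List (String × ν)) (k : String) :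
    alGet? l k = none ↔ k ∉ l.map Prod.fst := by
  induction l with
  | nil => simp [alGet?]
  | cons p rest ih =>
    by_cases h : p.1 == k
    · simp [alGet?, eq_of_beq h]
    · have : p.1 ≠ k := by simpa using h
      simp [alGet?, h, ih, Ne.symm this]

theorem mem_of_alGet?_eq_some {ν : Type} (l : List (String × ν)) (k : String) (v : ν)
    (h : alGet? l k = some v) : (k, v) ∈ l := by
  induction l with
  | nil => simp [alGet?] at h
  | cons p rest ih =>
    by_cases hk : p.1 == k
    · rw [alGet?, if_pos hk] at h
      have hv : v = p.2 := by simpa using h.symm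
      have hk' : k = p.1 := (eq_of_beq hk).symm
      subst hv; subst hk'
      simp
    · rw [alGet?, if_neg hk] at h
      exact List.mem_cons_of_mem _ (ih h)

theorem scanOk_of_pairCond (follows : List (String × List String)) (cs : List Char)
    (h : ∀ i, (hi : i < (cs.zip cs.tail).length) →
      (∀ q ∈ (cs.zip cs.tail).take i, pvPairOk follows q = true) →
      pvKeyOk follows ((cs.zip cs.tail)[i]) = true) :
    scanOk follows cs = true := by
  induction cs with
  | nil => rfl
  | cons c1 rest ih =>
    cases rest with
    | nil => rfl
    | cons c2 rest' =>
      have h0 : String.singleton c1 ∈ follows.map Prod.fst := by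
        have := h 0 (by simp) (by simp)
        simpa [pvKeyOk] using this
      cases halg : alGet? follows (String.singleton c1) with
      | none =>
        exact absurd h0 ((alGet?_eq_none_iff follows _).mp halg)
      | some succs =>
        simp only [scanOk, halg]
        by_cases hc : succs.contains (String.singleton c2) = true
        · rw [if_pos hc]
          apply ih
          intro i hi hall
          have hpair : pvPairOk follows (c1, c2) = true := by
            simp only [pvPairOk, List.any_eq_true]
            exact ⟨(String.singleton c1, succs), mem_of_alGet?_eq_some follows _ _ halg,
              by simpa using hc⟩
          have := h (i + 1) (by simpa using Nat.succ_lt_succ hi) ?_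
          · simpa [pvKeyOk] using this
          · intro q hq
            rcases (by simpa using hq : q = (c1, c2) ∨ q ∈ ((c2 :: rest').zip rest').take i) with
              rfl | hq'
            · exact hpair
            · exact hall q hq'
        · rw [if_neg hc]


-- A's per-root contribution, pulled out of the fold
def gA (follows : List (String × List String)) (root : String) : Int :=
  match isValidA? follows root.toList with
  | some true =>
    match root.toList.getLast? with
    | some c =>
      extA follows ((11 - (root.toList.length : Int)).toNat) (String.singleton c)
        (root.toList.length : Int)
    | none => 0
  | _ => 0

-- table level k counts extensions at length 11 - k
def tabAt (follows : List (String × List String)) : Nat → List (String × Int)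
  | 0 => []
  | k + 1 => mkLevelB follows (tabAt follows k) (11 - ((k : Int) + 1))

theorem findRootsB_eq (l : List String) (s : PySem.Set String) :
    findRootsB s l =
      l.foldl
        (fun roots candidate =>
          if roots.any (fun r => PySem.Str.startswith candidate r) then roots
          else PySem.Set.add roots candidate)
        s := by
  induction l generalizing s with
  | nil => rfl
  | cons c rest ih =>
    rw [findRootsB, List.foldl_cons, ih]
    congr 1
    cases hb : s.any (fun r => PySem.Str.startswith c r) <;> simp

theorem mem_foldl_rootStep (l : List String) (s : PySem.Set String) (x : String)
    (hx : x ∈ l.foldl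
        (fun roots candidate =>
          if roots.any (fun r => PySem.Str.startswith candidate r) then roots
          else PySem.Set.add roots candidate)
        s) : x ∈ s ∨ x ∈ l := by
  induction l generalizing s with
  | nil => exact Or.inl hx
  | cons c rest ih =>
    rw [List.foldl_cons] at hx
    rcases ih _ hx with h | h
    · by_cases hc : s.any (fun r => PySem.Str.startswith c r) = true
      · rw [if_pos hc] at h; exact Or.inl h
      · rw [if_neg hc] at h
        rcases (PySem.Set.mem_add s c x).mp h with h' | h'
        · exact Or.inl h'
        · exact Or.inr (by simp [h'])
    · exact Or.inr (List.mem_cons_of_mem _ h)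

theorem mem_findRootsA (prefixes : List String) (x : String)
    (hx : x ∈ findRootsA prefixes) : x ∈ prefixes := by
  rcases mem_foldl_rootStep prefixes PySem.Set.empty x hx with h | h
  · simp [PySem.Set.empty] at h
  · exact h

theorem alGet?_map {ν : Type} (l : List (String × List String)) (g : List String → ν)
    (k : String) :
    alGet? (l.map (fun p => (p.1, g p.2))) k = (alGet? l k).map g := by
  induction l with
  | nil => rfl
  | cons p rest ih =>
    by_cases h : p.1 == k <;> simp [alGet?, h, ih]

theorem isValidA?_eq_chainOkB (follows : List (String × List String)) (cs : List Char)
    (h : scanOk follows cs = true) :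
    isValidA? follows cs = some (chainOkB follows cs) := by
  induction cs with
  | nil => rfl
  | cons c1 rest ih =>
    cases rest with
    | nil => rfl
    | cons c2 rest' =>
      cases halg : alGet? follows (String.singleton c1) with
      | none => simp only [scanOk, halg] at h; exact Bool.noConfusion h
      | some succs =>
        simp only [scanOk, halg] at h
        by_cases hc : succs.contains (String.singleton c2) = true
        · rw [if_pos hc] at h
          simp only [isValidA?, halg]
          rw [if_pos hc, ih h]
          simp only [chainOkB, List.tail_cons, List.zip_cons_cons, List.all_cons, halg, hc,
            Bool.true_and]
        · simp only [isValidA?, halg]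
          rw [if_neg hc]
          have hcf : succs.contains (String.singleton c2) = false := Bool.eq_false_iff.mpr hc
          simp only [chainOkB, List.tail_cons, List.zip_cons_cons, List.all_cons, halg, hcf,
            Bool.false_and]

theorem levelsB_get? (follows : List (String × List String)) :
    ∀ k j, j ≤ k → (levelsB follows k)[j]? = some (tabAt follows (k - j)) := by
  intro k
  induction k with
  | zero =>
    intro j hj
    interval_cases j
    rfl
  | succ k ih =>
    intro j hj
    have hhead : (levelsB follows k).headD [] = tabAt follows k := by
      have h0 := ih 0 (Nat.zero_le _)
      cases hcase : levelsB follows k with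
      | nil => rw [hcase] at h0; simp at h0
      | cons t ts => rw [hcase] at h0; simpa using h0
    cases j with
    | zero => rw [levelsB, hhead]; rfl
    | succ j =>
      rw [levelsB]
      simpa using ih j (Nat.succ_le_succ_iff.mp hj)

theorem tab_eq_ext (follows : List (String × List String)) :
    ∀ k, k ≤ 11 → ∀ ch,
      alGetD (tabAt follows k) ch (if 7 ≤ (11 - (k : Int)) then 1 else 0)
        = extA follows k ch (11 - (k : Int)) := by
  intro k
  induction k with
  | zero => intro _ ch; simp [tabAt, alGetD, alGet?, extA]
  | succ k ih =>
    intro hk ch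
    have hcast : ((k + 1 : Nat) : Int) = (k : Int) + 1 := by push_cast; ring
    rw [hcast]
    have hLne : (11 : Int) - ((k : Int) + 1) ≠ 11 := by omega
    rw [extA, if_neg hLne]
    rw [PySem.List.foldl_add]
    have hbase : (if 7 ≤ (11 : Int) - ((k : Int) + 1) ∧ (11 : Int) - ((k : Int) + 1) < 11 then (1 : Int) else 0)
        = (if 7 ≤ (11 : Int) - ((k : Int) + 1) then (1 : Int) else 0) := by
      split_ifs with h1 h2 <;> first | rfl | omega
    rw [hbase]
    show alGetD (mkLevelB follows (tabAt follows k) (11 - ((k : Int) + 1))) ch _ = _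
    rw [alGetD, mkLevelB,
      alGet?_map follows
        (fun succs => (if 7 ≤ (11 : Int) - ((k : Int) + 1) then (1 : Int) else 0)
          + (succs.map (fun s =>
              alGetD (tabAt follows k) s
                (if 7 ≤ (11 : Int) - ((k : Int) + 1) + 1 then (1 : Int) else 0))).sum)
        ch]
    have hmap : (fun s =>
        alGetD (tabAt follows k) s
          (if 7 ≤ (11 : Int) - ((k : Int) + 1) + 1 then (1 : Int) else 0))
        = fun s => extA follows k s ((11 : Int) - ((k : Int) + 1) + 1) := by
      funext s
      have h1 : (11 : Int) - ((k : Int) + 1) + 1 = 11 - (k : Int) := by ring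
      rw [h1]
      exact ih (by omega) s
    cases halg : alGet? follows ch with
    | none =>
      simp only [Option.map_none, Option.getD_none]
      rw [show alGetD follows ch [] = [] by rw [alGetD, halg]; rfl]
      simp
    | some succs =>
      simp only [Option.map_some, Option.getD_some]
      rw [show alGetD follows ch [] = succs by rw [alGetD, halg]; rfl]
      rw [hmap]

theorem countAtB_eq (follows : List (String × List String)) (L : Int)
    (h0 : 0 ≤ L) (h1 : L ≤ 11) (ch : String) :
    countAtB (levelsB follows 11) ch L = extA follows (11 - L).toNat ch L := by
  obtain ⟨n, rfl⟩ : ∃ n : Nat, L = (n : Int) := ⟨L.toNat, (Int.toNat_of_nonneg h0).symm⟩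
  have hn : n ≤ 11 := by exact_mod_cast h1
  rw [countAtB, if_neg (by omega), PySem.List.pyGet?_natCast,
    levelsB_get? follows 11 n hn]
  have h2 : ((11 : Int) - (n : Int)).toNat = 11 - n := by omega
  rw [h2]
  have h3 := tab_eq_ext follows (11 - n) (by omega) ch
  have h4 : (11 : Int) - ((11 - n : Nat) : Int) = (n : Int) := by omega
  rw [h4] at h3
  exact h3

-- B's per-root contribution (the lambda inside part3_dynprog_alt)
def gB (follows : List (String × List String)) (tabs : List (List (String × Int)))
    (r : String) : Int :=
  match r.toList.getLast? with
  | some c =>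
    if chainOkB follows r.toList then countAtB tabs (String.singleton c) (r.toList.length : Int)
    else 0
  | none => 0

theorem gA_eq_gB (follows : List (String × List String)) (root : String)
    (hne : root ≠ "") (hlen : root.toList.length ≤ 11)
    (hscan : scanOk follows root.toList = true) :
    gA follows root = gB follows (levelsB follows 11) root := by
  have hnil : root.toList ≠ [] := by
    intro hcon
    exact hne (by rwa [← String.toList_eq_nil_iff])
  obtain ⟨c, hc⟩ := Option.ne_none_iff_exists'.mp (mt List.getLast?_eq_none_iff.mp hnil)
  rw [gA, gB, isValidA?_eq_chainOkB follows root.toList hscan, hc]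
  cases hb : chainOkB follows root.toList
  · rfl
  · have h1 : (1 : Int) ≤ (root.toList.length : Int) := by
      have := List.length_pos_iff.mpr hnil
      omega
    have key := countAtB_eq follows (root.toList.length : Int) (by omega)
      (by exact_mod_cast hlen) (String.singleton c)
    simp at key ⊢
    exact key.symm

theorem part3_dynprog_spec : Claim_equal_part3_dynprog := by
  intro input _dom hpre
  unfold Spec_part3_dynprog
  obtain ⟨prefixes, follows⟩ := input
  show (findRootsA prefixes).foldl _ 0 = _
  rw [part3_dynprog_alt]
  simp only
  rw [findRootsB_eq]
  have hroots : prefixes.foldl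
      (fun roots candidate =>
        if roots.any (fun r => PySem.Str.startswith candidate r) then roots
        else PySem.Set.add roots candidate)
      PySem.Set.empty = findRootsA prefixes := rfl
  rw [hroots]
  have hmem : ∀ root ∈ findRootsA prefixes,
      root ≠ "" ∧ root.toList.length ≤ 11 ∧ scanOk follows root.toList = true := by
    intro root hr
    obtain ⟨h1, h2, h3⟩ := hpre root (mem_findRootsA prefixes root hr)
    exact ⟨h1, h2, scanOk_of_pairCond follows root.toList h3⟩
  calc (findRootsA prefixes).foldl
        (fun total root =>
          match isValidA? follows root.toList with
          | some true =>
            match root.toList.getLast? with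
            | some c =>
              total + extA follows ((11 - (root.toList.length : Int)).toNat)
                        (String.singleton c) (root.toList.length : Int)
            | none => total
          | _ => total)
        0
      = (findRootsA prefixes).foldl (fun total root => total + gA follows root) 0 := by
        apply PySem.List.foldl_congr_mem
        intro acc root _
        rw [gA]
        rcases isValidA? follows root.toList with _ | b
        · simp
        · cases b
          · simp
          · rcases root.toList.getLast? with _ | c <;> simp
    _ = 0 + ((findRootsA prefixes).map (gA follows)).sum := PySem.List.foldl_add _ _ _
    _ = ((findRootsA prefixes).map (gB follows (levelsB follows 11))).sum := by
        rw [zero_add]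
        congr 1
        apply List.map_congr_left
        intro root hr
        obtain ⟨h1, h2, h3⟩ := hmem root hr
        exact gA_eq_gB follows root h1 h2 h3
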